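-- pv_equiv track=rewrite | github.com/ruthaleks/kattis | pizza-hawaii/pizza.py | match_ingredients
-- ===== SOURCE A (Python) =====
-- import copy
--
-- def match_ingredients(D, pizza_list):
--     for i in pizza_list:
--         ger_list = i[0]
--         eng_list = i[1]
--         for ger_ing in ger_list:
--             if ger_ing not in D:
--                 D[ger_ing] = copy.copy(eng_list)
--             else:
--                 for eng_ing in copy.copy(D[ger_ing]):
--                     if eng_ing not in eng_list:
--                         D[ger_ing].remove(eng_ing)
--     return D
-- ===== SOURCE B (Python) =====
-- def match_ingredients(D, pizza_list):
--     # Group first, then intersect per german ingredient (return value and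
--     # in-place mutation of D match A's).
--     groups = {}
--     for pizza in pizza_list:
--         ger_list = pizza[0]
--         eng_list = pizza[1]
--         for g in ger_list:
--             groups.setdefault(g, []).append(eng_list)
--     for g, lists in groups.items():
--         if g in D:
--             base, rest = D[g], lists
--         else:
--             base, rest = lists[0], lists[1:]
--         sets = [set(l) for l in rest]
--         D[g] = [x for x in base if all(x in s for s in sets)]
--     return D
-- ===== Notes on version B (the rewrite author's own statement) =====
-- stated objective: alternative
-- what changed: B first groups, in one pass, every english list attached to each german ingredient into a dict, then computes each final entry with a single set-based filter over the base list, instead of A's per-pizza in-place list.remove loops (a linear rescan per removed element) run on the live dict.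
import Mathlib
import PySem

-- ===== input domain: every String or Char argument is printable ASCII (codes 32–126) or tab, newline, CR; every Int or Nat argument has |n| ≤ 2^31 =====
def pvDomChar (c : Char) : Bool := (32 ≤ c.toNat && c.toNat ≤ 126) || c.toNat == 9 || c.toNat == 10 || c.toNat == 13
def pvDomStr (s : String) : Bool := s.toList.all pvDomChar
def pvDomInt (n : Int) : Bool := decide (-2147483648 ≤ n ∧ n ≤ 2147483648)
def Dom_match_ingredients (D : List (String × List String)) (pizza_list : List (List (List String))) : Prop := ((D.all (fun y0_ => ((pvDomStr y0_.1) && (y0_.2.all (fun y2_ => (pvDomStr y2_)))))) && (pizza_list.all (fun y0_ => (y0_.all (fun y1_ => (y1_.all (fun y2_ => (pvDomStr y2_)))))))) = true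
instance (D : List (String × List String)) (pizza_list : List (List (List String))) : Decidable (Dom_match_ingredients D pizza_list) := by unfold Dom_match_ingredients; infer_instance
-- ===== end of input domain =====

-- B groups all english lists per german ingredient once, then builds each final entry with a
-- single set-based filter, instead of A's per-pizza in-place list.remove loops on the live dict.
-- A mutates the dict D in place; the equivalence proved here is about the returned mapping.

-- ===== PORT A =====
-- inner loop body: "for eng_ing in copy(D[ger]): if eng_ing not in eng_list: D[ger].remove(eng_ing)"
def pvRemoveStep (g : String) (eng_list : List String) (d : PySem.Dict String (List String)) (e : String) : PySem.Dict String (List String) :=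
  if eng_list.contains e = false then
    match PySem.List.remove? (d.getD g []) e with
    | some l => d.insert g l
    | none => d
  else d

def pvStepGer (eng_list : List String) (d : PySem.Dict String (List String)) (g : String) : PySem.Dict String (List String) :=
  if d.contains g = false then d.insert g eng_list
  else (d.getD g []).foldl (pvRemoveStep g eng_list) d

def pvStepPizza (d : PySem.Dict String (List String)) (i : List (List String)) : PySem.Dict String (List String) :=
  match PySem.List.pyGet? i 0, PySem.List.pyGet? i 1 with
  | some ger_list, some eng_list => ger_list.foldl (pvStepGer eng_list) d
  | _, _ => d

def match_ingredients (D : List (String × List String)) (pizza_list : List (List (List String))) : List (String × List String) :=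
  (pizza_list.foldl pvStepPizza (PySem.Dict.ofList D)).items

-- ===== PORT B =====
-- "groups.setdefault(g, []).append(eng_list)"
def pvGroupGer (eng_list : List String) (G : PySem.Dict String (List (List String))) (g : String) : PySem.Dict String (List (List String)) :=
  G.modify g [] (fun ls => ls ++ [eng_list])

def pvGroupPizza (G : PySem.Dict String (List (List String))) (i : List (List String)) : PySem.Dict String (List (List String)) :=
  match PySem.List.pyGet? i 0, PySem.List.pyGet? i 1 with
  | some ger_list, some eng_list => ger_list.foldl (pvGroupGer eng_list) G
  | _, _ => G

-- one iteration of "for g, lists in groups.items(): ..."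
def pvStepItem (d : PySem.Dict String (List String)) (p : String × List (List String)) : PySem.Dict String (List String) :=
  let br : List String × List (List String) :=
    if d.contains p.1 then (d.getD p.1 [], p.2)
    else match p.2 with
         | l0 :: rest => (l0, rest)
         | [] => ([], [])   -- unreachable: every group list is nonempty
  let sets := br.2.map (fun l => PySem.Set.ofList l)
  d.insert p.1 (br.1.filter (fun x => sets.all (fun s => PySem.Set.contains s x)))

def match_ingredients_alt (D : List (String × List String)) (pizza_list : List (List (List String))) : List (String × List String) :=
  ((pizza_list.foldl pvGroupPizza PySem.Dict.empty).items.foldl pvStepItem (PySem.Dict.ofList D)).items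

-- ===== PRECONDITION & SPEC =====
-- Pre_ excludes exactly the inputs where Python A raises: a pizza with fewer than two fields
-- makes `i[0]` / `i[1]` an IndexError.
def Pre_match_ingredients (D : List (String × List String)) (pizza_list : List (List (List String))) : Prop :=
  ∀ i ∈ pizza_list, 2 ≤ i.length
instance (D : List (String × List String)) (pizza_list : List (List (List String))) : Decidable (Pre_match_ingredients D pizza_list) := by unfold Pre_match_ingredients; infer_instance

def pvWitness_match_ingredients : (List (String × List String)) × List (List (List String)) :=
  ([("a", ["x", "y"])], [[["a", "b"], ["y", "z"]]])

def Spec_match_ingredients (D : List (String × List String)) (pizza_list : List (List (List String))) (out : List (String × List String)) : Prop := out = match_ingredients_alt D pizza_list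
instance (D : List (String × List String)) (pizza_list : List (List (List String))) (out : List (String × List String)) : Decidable (Spec_match_ingredients D pizza_list out) := by unfold Spec_match_ingredients; infer_instance

-- ===== CLAIM (what is proved, stated in full; the proofs are below) =====
def Claim_equal_match_ingredients : Prop := ∀ (D : List (String × List String)) (pizza_list : List (List (List String))), Dom_match_ingredients D pizza_list → Pre_match_ingredients D pizza_list → Spec_match_ingredients D pizza_list (match_ingredients D pizza_list)

-- ===== LEMMAS AND PROOFS =====

-- the canonical per-ingredient step A's per-ger loop amounts to (under distinct keys)
def sA (d : PySem.Dict String (List String)) (g : String) (el : List String) : PySem.Dict String (List String) :=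
  if d.contains g then d.insert g ((d.getD g []).filter (fun x => el.contains x)) else d.insert g el

def filt (base : List String) (lists : List (List String)) : List String :=
  base.filter (fun x => lists.all (fun l => l.contains x))

-- B's second loop as a function of the group items
def finishL (d : PySem.Dict String (List String)) (L : List (String × List (List String))) : PySem.Dict String (List String) :=
  L.foldl pvStepItem d

-- ---- generic Dict structural lemmas ----

theorem insert_insert_self {κ ν : Type} [BEq κ] [LawfulBEq κ] (d : PySem.Dict κ ν) (k : κ) (v w : ν) :
    (d.insert k v).insert k w = d.insert k w := by
  apply PySem.Dict.ext
  have h2 : (d.insert k v).contains k = true := PySem.Dict.contains_insert_self d k v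
  by_cases h : d.contains k = true
  · rw [PySem.Dict.items_insert_of_contains _ w h2,
        PySem.Dict.items_insert_of_contains _ v h, PySem.Dict.items_insert_of_contains _ w h,
        List.map_map]
    apply List.map_congr_left
    intro p _
    by_cases hp : (p.1 == k) = true <;> simp [hp]
  · rw [PySem.Dict.items_insert_of_contains _ w h2,
        PySem.Dict.items_insert_of_not_contains _ v (by simpa using h),
        PySem.Dict.items_insert_of_not_contains _ w (by simpa using h),
        List.map_append]
    have hL : ∀ p ∈ d.items, (p.1 == k) = false := by
      intro p hp
      by_contra hc
      simp only [PySem.Dict.contains] at h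
      exact h (List.any_eq_true.2 ⟨p, hp, by simpa using hc⟩)
    have hmap : ∀ (L : List (κ × ν)), (∀ p ∈ L, (p.1 == k) = false) →
        L.map (fun p => if (p.1 == k) = true then (k, w) else p) = L := by
      intro L hF
      induction L with
      | nil => rfl
      | cons q t ih =>
        simp only [List.map_cons, hF q (by simp)]
        rw [if_neg (by simp), ih (fun p hp => hF p (List.mem_cons_of_mem _ hp))]
    rw [hmap d.items hL]
    simp

theorem insert_insert_of_ne_contains {κ ν : Type} [BEq κ] [LawfulBEq κ] (d : PySem.Dict κ ν) (g k : κ) (w v : ν)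
    (hne : k ≠ g) (hg : d.contains g = true) :
    (d.insert g w).insert k v = (d.insert k v).insert g w := by
  apply PySem.Dict.ext
  have hkg : (k == g) = false := by simpa using hne
  have hgk : (g == k) = false := by simpa using (Ne.symm hne)
  have hg' : (d.insert k v).contains g = true := by
    rw [PySem.Dict.contains_insert]; simp [hg]
  by_cases hk : d.contains k = true
  · have hk' : (d.insert g w).contains k = true := by
      rw [PySem.Dict.contains_insert]; simp [hk]
    rw [PySem.Dict.items_insert_of_contains _ v hk',
        PySem.Dict.items_insert_of_contains _ w hg,
        PySem.Dict.items_insert_of_contains _ w hg',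
        PySem.Dict.items_insert_of_contains _ v hk,
        List.map_map, List.map_map]
    apply List.map_congr_left
    intro p _
    by_cases hp : (p.1 == g) = true
    · have : (p.1 == k) = false := by
        have := eq_of_beq hp; subst this; exact hgk
      simp [hp, this, hgk]
    · by_cases hq : (p.1 == k) = true
      · have : (p.1 == g) = false := by simpa using hp
        simp [hp, hq, hkg]
      · simp [hp, hq]
  · have hk' : (d.insert g w).contains k = false := by
      rw [PySem.Dict.contains_insert]; simp [hkg, hk]
    rw [PySem.Dict.items_insert_of_not_contains _ v hk',
        PySem.Dict.items_insert_of_contains _ w hg,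
        PySem.Dict.items_insert_of_contains _ w hg',
        PySem.Dict.items_insert_of_not_contains _ v (by simpa using hk),
        List.map_append]
    simp [hkg]

theorem insert_get?_self {κ ν : Type} [BEq κ] [LawfulBEq κ] (d : PySem.Dict κ ν) (k : κ) (v : ν)
    (hnd : d.keys.Nodup) (h : d.get? k = some v) : d.insert k v = d := by
  apply PySem.Dict.ext
  have hc : d.contains k = true := by
    rw [PySem.Dict.contains_eq_isSome_get?, h]; rfl
  rw [PySem.Dict.items_insert_of_contains _ v hc]
  have : List.map (fun p => if (p.1 == k) = true then (k, v) else p) d.items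
      = List.map id d.items := by
    apply List.map_congr_left
    intro p hp
    by_cases hpk : (p.1 == k) = true
    · have hk : p.1 = k := eq_of_beq hpk
      have : d.get? k = some p.2 := by
        apply PySem.Dict.get?_of_mem_items _ _ hnd
        rw [← hk]; exact hp
      rw [h] at this
      simp only [hpk, if_true, Option.some.injEq] at this ⊢
      rw [← hk, this]
      rfl
    · simp [hpk]
  rw [this, List.map_id]

theorem remove?_append_cons {α : Type} [BEq α] [LawfulBEq α] (u w : List α) (x : α) (hx : x ∉ u) :
    PySem.List.remove? (u ++ x :: w) x = some (u ++ w) := by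
  rw [PySem.List.remove?_eq_some_erase _ x (by simp), List.erase_append_right _ hx]
  simp

-- ---- A's remove loop is a filter ----
theorem removeLoop_eq_filter (g : String) (el : List String) :
    ∀ (b a : List String) (d : PySem.Dict String (List String)), d.keys.Nodup →
      d.get? g = some (a.filter (fun x => el.contains x) ++ b) →
      b.foldl (pvRemoveStep g el) d = d.insert g ((a ++ b).filter (fun x => el.contains x)) := by
  intro b
  induction b with
  | nil =>
    intro a d hnd h
    simp only [List.append_nil] at h ⊢
    rw [List.foldl_nil, insert_get?_self d g _ hnd h]
  | cons x b' ih =>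
    intro a d hnd h
    rw [List.foldl_cons]
    by_cases hP : el.contains x = true
    · have hfa : (a ++ [x]).filter (fun x => el.contains x)
          = a.filter (fun x => el.contains x) ++ [x] := by
        rw [List.filter_append]; simp [List.mem_of_elem_eq_true hP]
      have hstep : pvRemoveStep g el d x = d := by
        rw [pvRemoveStep, if_neg (by rw [hP]; simp)]
      rw [hstep, ih (a ++ [x]) d hnd (by rw [hfa, List.append_assoc, List.singleton_append]; exact h),
          List.append_assoc, List.singleton_append]
    · have hP' : el.contains x = false := by simpa using hP
      have hfa : (a ++ [x]).filter (fun x => el.contains x)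
          = a.filter (fun x => el.contains x) := by
        rw [List.filter_append]; simp only [List.filter_cons, hP', List.filter_nil]
        simp
      have hxnot : x ∉ a.filter (fun x => el.contains x) := by
        intro hmem
        rw [List.mem_filter] at hmem
        rw [hmem.2] at hP'
        simp at hP'
      have hgetD : d.getD g [] = a.filter (fun x => el.contains x) ++ x :: b' := by
        rw [PySem.Dict.getD_eq_get?_getD, h]; rfl
      have hstep : pvRemoveStep g el d x
          = d.insert g (a.filter (fun x => el.contains x) ++ b') := by
        rw [pvRemoveStep, if_pos (by rw [hP']), hgetD, remove?_append_cons _ _ _ hxnot]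
      rw [hstep,
          ih (a ++ [x]) _ (PySem.Dict.nodup_keys_insert _ _ _ hnd)
            (by rw [PySem.Dict.get?_insert_self, hfa]),
          insert_insert_self, List.append_assoc, List.singleton_append]

theorem stepGer_eq_sA (el : List String) (d : PySem.Dict String (List String)) (g : String)
    (hnd : d.keys.Nodup) : pvStepGer el d g = sA d g el := by
  by_cases hc : d.contains g = true
  · obtain ⟨cur, hcur⟩ : ∃ cur, d.get? g = some cur := by
      rw [PySem.Dict.contains_eq_isSome_get?] at hc
      exact Option.isSome_iff_exists.1 hc
    have hgetD : d.getD g [] = cur := by rw [PySem.Dict.getD_eq_get?_getD, hcur]; rfl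
    rw [pvStepGer, if_neg (by simp [hc]), sA, if_pos hc, hgetD,
        removeLoop_eq_filter g el cur [] d hnd (by simpa using hcur)]
    simp
  · rw [pvStepGer, if_pos (by simpa using hc), sA, if_neg hc]

-- pvStepItem at a key k commutes with the canonical step at a distinct, already-present key g
theorem stepItem_sA_comm (g k : String) (el : List String) (ls : List (List String))
    (d : PySem.Dict String (List String)) (hne : k ≠ g) (hg : d.contains g = true) :
    pvStepItem (sA d g el) (k, ls) = sA (pvStepItem d (k, ls)) g el := by
  have hkg : (k == g) = false := by simpa using hne
  have hgk : (g == k) = false := by simpa using (Ne.symm hne)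
  rw [sA, if_pos hg, pvStepItem, pvStepItem, sA]
  dsimp only
  rw [PySem.Dict.contains_insert, hkg, Bool.false_or,
      PySem.Dict.getD_insert, if_neg hne,
      PySem.Dict.contains_insert, hgk, Bool.false_or, if_pos hg,
      PySem.Dict.getD_insert, if_neg (Ne.symm hne),
      insert_insert_of_ne_contains d g k _ _ hne hg]

-- ---- the group-then-finish / process-now commutation ----
theorem finishL_sA_comm (g : String) (el : List String) :
    ∀ (t : List (String × List (List String))) (d : PySem.Dict String (List String)),
      d.keys.Nodup → d.contains g = true → g ∉ t.map Prod.fst →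
      finishL (sA d g el) t = sA (finishL d t) g el := by
  intro t
  induction t with
  | nil => intro d _ _ _; rfl
  | cons p t' ih =>
    intro d hnd hg hgt
    obtain ⟨k, ls⟩ := p
    have hne : k ≠ g := by
      intro hkg
      exact hgt (by simp [hkg])
    obtain ⟨v, hv⟩ : ∃ v, pvStepItem d (k, ls) = d.insert k v := ⟨_, rfl⟩
    rw [finishL, List.foldl_cons, ← finishL,
        stepItem_sA_comm g k el ls d hne hg, hv,
        ih _ (PySem.Dict.nodup_keys_insert _ _ _ hnd)
          (by rw [PySem.Dict.contains_insert]; simp [hg])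
          (fun hmem => hgt (by simp [hmem]))]
    rw [show finishL d ((k, ls) :: t') = finishL (pvStepItem d (k, ls)) t' from rfl, hv]

theorem modify_cons_ne (g k : String) (ls : List (List String)) (L : List (String × List (List String)))
    (f : List (List String) → List (List String)) (hne : k ≠ g) :
    ((⟨(k, ls) :: L⟩ : PySem.Dict String (List (List String))).modify g [] f).items
      = (k, ls) :: ((⟨L⟩ : PySem.Dict String (List (List String))).modify g [] f).items := by
  have hkg : (k == g) = false := by simpa using hne
  simp only [PySem.Dict.modify, PySem.Dict.insert, PySem.Dict.contains, PySem.Dict.getD,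
    PySem.Dict.get?, List.any_cons, hkg, Bool.false_or, List.find?_cons,
    List.map_cons]
  by_cases h : L.any (fun p => p.1 == g) = true <;> simp [h]

theorem modify_cons_self (g : String) (ls : List (List String)) (L : List (String × List (List String)))
    (f : List (List String) → List (List String)) (hF : ∀ p ∈ L, (p.1 == g) = false) :
    ((⟨(g, ls) :: L⟩ : PySem.Dict String (List (List String))).modify g [] f).items
      = (g, f ls) :: L := by
  simp only [PySem.Dict.modify, PySem.Dict.insert, PySem.Dict.contains, PySem.Dict.getD,
    PySem.Dict.get?, List.any_cons, List.find?_cons, List.map_cons]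
  have hid : List.map (fun p => if p.1 = g then (g, f ls) else p) L = List.map id L := by
    apply List.map_congr_left
    intro p hp
    have hne : p.1 ≠ g := by simpa using hF p hp
    simp [hne]
  simp [hid]

theorem modify_nil (g : String) (f : List (List String) → List (List String)) :
    ((⟨[]⟩ : PySem.Dict String (List (List String))).modify g [] f).items = [(g, f [])] := by
  rfl

-- the filter of a filter is the filter by the appended group lists
theorem filter_filter_append (base : List String) (ls : List (List String)) (el : List String) :
    ((base.filter (fun x => (ls.map (fun l => PySem.Set.ofList l)).all
        (fun s => PySem.Set.contains s x))).filter (fun x => el.contains x))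
      = base.filter (fun x => ((ls ++ [el]).map (fun l => PySem.Set.ofList l)).all
        (fun s => PySem.Set.contains s x)) := by
  rw [List.filter_filter]
  apply List.filter_congr
  intro x _
  have h1 : PySem.Set.contains (PySem.Set.ofList el) x = el.contains x := by
    by_cases hx : x ∈ el
    · rw [PySem.Set.contains_eq_listContains]
      simp [PySem.Set.mem_ofList, hx]
    · rw [PySem.Set.contains_eq_listContains]
      simp [PySem.Set.mem_ofList, hx]
  simp only [List.map_append, List.all_append, List.map_cons, List.map_nil, List.all_cons,
    List.all_nil, h1, Bool.and_comm]
  simp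

-- processing one more english list for key g composes with the canonical step
theorem stepItem_append (d : PySem.Dict String (List String)) (g : String)
    (ls : List (List String)) (el : List String) (hls : ls ≠ []) :
    pvStepItem d (g, ls ++ [el]) = sA (pvStepItem d (g, ls)) g el := by
  by_cases hc : d.contains g = true
  · have hv : pvStepItem d (g, ls)
        = d.insert g ((d.getD g []).filter (fun x => (ls.map (fun l => PySem.Set.ofList l)).all
            (fun s => PySem.Set.contains s x))) := by
      rw [pvStepItem]
      dsimp only
      rw [if_pos hc]
    rw [hv, sA, if_pos (PySem.Dict.contains_insert_self d g _),
        PySem.Dict.getD_insert, if_pos rfl, insert_insert_self,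
        filter_filter_append, pvStepItem]
    dsimp only
    rw [if_pos hc]
  · obtain ⟨l0, rest, rfl⟩ : ∃ l0 rest, ls = l0 :: rest := by
      cases ls with
      | nil => exact absurd rfl hls
      | cons a b => exact ⟨a, b, rfl⟩
    have h1 : pvStepItem d (g, l0 :: rest)
        = d.insert g (l0.filter (fun x => (rest.map (fun l => PySem.Set.ofList l)).all
            (fun s => PySem.Set.contains s x))) := by
      rw [pvStepItem]
      dsimp only
      rw [if_neg hc]
    have h2 : pvStepItem d (g, (l0 :: rest) ++ [el])
        = d.insert g (l0.filter (fun x => ((rest ++ [el]).map (fun l => PySem.Set.ofList l)).all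
            (fun s => PySem.Set.contains s x))) := by
      rw [pvStepItem]
      dsimp only
      rw [if_neg hc]
      rfl
    rw [h1, h2, sA, if_pos (PySem.Dict.contains_insert_self d g _),
        PySem.Dict.getD_insert, if_pos rfl, insert_insert_self, filter_filter_append]

-- finishL turns one setdefault-append of the groups dict into one canonical step
theorem finishL_modify (g : String) (el : List String) :
    ∀ (L : List (String × List (List String))) (d : PySem.Dict String (List String)),
      d.keys.Nodup → (L.map Prod.fst).Nodup → (∀ p ∈ L, p.2 ≠ []) →
      finishL d ((⟨L⟩ : PySem.Dict String (List (List String))).modify g []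
          (fun ls => ls ++ [el])).items
        = sA (finishL d L) g el := by
  intro L
  induction L with
  | nil =>
    intro d hnd _ _
    rw [modify_nil]
    show pvStepItem d (g, [el]) = sA d g el
    by_cases hc : d.contains g = true
    · rw [pvStepItem]
      dsimp only
      rw [if_pos hc, sA, if_pos hc]
      congr 1
      apply List.filter_congr
      intro x _
      by_cases hx : x ∈ el <;>
        simp [PySem.Set.contains_eq_listContains, PySem.Set.mem_ofList, hx]
    · rw [pvStepItem]
      dsimp only
      rw [if_neg hc, sA, if_neg hc]
      congr 1
      simp
  | cons p t ih =>
    intro d hnd hkeys hvals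
    obtain ⟨k, ls⟩ := p
    by_cases hkg : k = g
    · subst hkg
      have hF : ∀ p ∈ t, (p.1 == k) = false := by
        intro p hp
        have := (List.nodup_cons.1 hkeys).1
        simp only [List.map_cons] at *
        by_contra hc
        exact this (List.mem_map.2 ⟨p, hp, (eq_of_beq (by simpa using hc))⟩)
      rw [modify_cons_self k ls t _ hF]
      show finishL (pvStepItem d (k, ls ++ [el])) t = sA (finishL d ((k, ls) :: t)) k el
      rw [stepItem_append d k ls el (hvals (k, ls) (by simp)),
          show finishL d ((k, ls) :: t) = finishL (pvStepItem d (k, ls)) t from rfl]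
      obtain ⟨v, hv⟩ : ∃ v, pvStepItem d (k, ls) = d.insert k v := ⟨_, rfl⟩
      rw [hv, finishL_sA_comm k el t _ (PySem.Dict.nodup_keys_insert _ _ _ hnd)
        (PySem.Dict.contains_insert_self d k v)
        (by intro hmem
            exact (List.nodup_cons.1 hkeys).1 (by simpa using hmem))]
    · rw [modify_cons_ne g k ls t _ hkg]
      show finishL (pvStepItem d (k, ls)) ((⟨t⟩ : PySem.Dict String (List (List String))).modify g []
          (fun ls => ls ++ [el])).items = sA (finishL (pvStepItem d (k, ls)) t) g el
      obtain ⟨v, hv⟩ : ∃ v, pvStepItem d (k, ls) = d.insert k v := ⟨_, rfl⟩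
      rw [hv]
      exact ih _ (PySem.Dict.nodup_keys_insert _ _ _ hnd) (List.nodup_cons.1 hkeys).2
        (fun p hp => hvals p (List.mem_cons_of_mem _ hp))

-- invariants of the groups dict
theorem groupGer_nodup (el : List String) (G : PySem.Dict String (List (List String))) (g : String)
    (h : G.keys.Nodup) : (pvGroupGer el G g).keys.Nodup :=
  PySem.Dict.nodup_keys_insert _ _ _ h

theorem groupGer_vals (el : List String) (G : PySem.Dict String (List (List String))) (g : String)
    (h : ∀ p ∈ G.items, p.2 ≠ []) : ∀ p ∈ (pvGroupGer el G g).items, p.2 ≠ [] := by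
  intro p hp
  rw [pvGroupGer, PySem.Dict.modify, PySem.Dict.items_insert] at hp
  by_cases hc : G.contains g = true
  · rw [if_pos hc] at hp
    obtain ⟨q, hq, hpq⟩ := List.mem_map.1 hp
    by_cases hqk : (q.1 == g) = true
    · rw [if_pos hqk] at hpq
      subst hpq
      simp
    · rw [if_neg hqk] at hpq
      subst hpq
      exact h q hq
  · rw [if_neg hc] at hp
    rcases List.mem_append.1 hp with h1 | h1
    · exact h p h1
    · simp only [List.mem_singleton] at h1
      subst h1
      simp
  
theorem groupFold_nodup (el : List String) :
    ∀ (gl : List String) (G : PySem.Dict String (List (List String))), G.keys.Nodup →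
      (gl.foldl (pvGroupGer el) G).keys.Nodup := by
  intro gl
  induction gl with
  | nil => intro G h; exact h
  | cons g gl ih => intro G h; exact ih _ (groupGer_nodup el G g h)

theorem groupFold_vals (el : List String) :
    ∀ (gl : List String) (G : PySem.Dict String (List (List String))),
      (∀ p ∈ G.items, p.2 ≠ []) → ∀ p ∈ (gl.foldl (pvGroupGer el) G).items, p.2 ≠ [] := by
  intro gl
  induction gl with
  | nil => intro G h; exact h
  | cons g gl ih => intro G h; exact ih _ (groupGer_vals el G g h)

theorem finishL_nodup (d : PySem.Dict String (List String))
    (L : List (String × List (List String))) (h : d.keys.Nodup) : (finishL d L).keys.Nodup := by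
  induction L generalizing d with
  | nil => exact h
  | cons p t ih =>
    obtain ⟨v, hv⟩ : ∃ v, pvStepItem d p = d.insert p.1 v := ⟨_, rfl⟩
    rw [finishL, List.foldl_cons, ← finishL, hv]
    exact ih _ (PySem.Dict.nodup_keys_insert _ _ _ h)

-- one pizza: grouping then finishing = A's per-ger loop
theorem finishL_groupGer_fold (el : List String) :
    ∀ (gl : List String) (G : PySem.Dict String (List (List String)))
      (d : PySem.Dict String (List String)),
      d.keys.Nodup → G.keys.Nodup → (∀ p ∈ G.items, p.2 ≠ []) →
      finishL d (gl.foldl (pvGroupGer el) G).items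
        = gl.foldl (pvStepGer el) (finishL d G.items) := by
  intro gl
  induction gl with
  | nil => intro G d _ _ _; rfl
  | cons g gl ih =>
    intro G d hnd hG hvals
    rw [List.foldl_cons, List.foldl_cons,
        ih _ _ hnd (groupGer_nodup el G g hG) (groupGer_vals el G g hvals),
        stepGer_eq_sA el _ g (finishL_nodup d G.items hnd)]
    congr 1
    obtain ⟨L⟩ := G
    exact finishL_modify g el L d hnd hG hvals

theorem main_comm :
    ∀ (ps : List (List (List String))) (G : PySem.Dict String (List (List String)))
      (d : PySem.Dict String (List String)),
      d.keys.Nodup → G.keys.Nodup → (∀ p ∈ G.items, p.2 ≠ []) →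
      finishL d (ps.foldl pvGroupPizza G).items = ps.foldl pvStepPizza (finishL d G.items) := by
  intro ps
  induction ps with
  | nil => intro G d _ _ _; rfl
  | cons i ps ih =>
    intro G d hnd hG hvals
    rw [List.foldl_cons, List.foldl_cons]
    match hi : PySem.List.pyGet? i 0, hj : PySem.List.pyGet? i 1 with
    | some gl, some el =>
      rw [pvGroupPizza, hi, hj,
          ih _ _ hnd (groupFold_nodup el gl G hG) (groupFold_vals el gl G hvals),
          finishL_groupGer_fold el gl G d hnd hG hvals, pvStepPizza, hi, hj]
    | some gl, none =>
      rw [pvGroupPizza, hi, hj, ih _ _ hnd hG hvals, pvStepPizza, hi, hj]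
    | none, _ =>
      rw [pvGroupPizza, hi, ih _ _ hnd hG hvals, pvStepPizza, hi]

-- ===== VERDICT (by name: the statement is the Claim_ definition above) =====
theorem match_ingredients_spec : Claim_equal_match_ingredients := by
  intro D pizza_list _ _
  unfold Spec_match_ingredients match_ingredients match_ingredients_alt
  rw [show (pizza_list.foldl pvGroupPizza PySem.Dict.empty).items.foldl pvStepItem
        (PySem.Dict.ofList D)
      = finishL (PySem.Dict.ofList D) (pizza_list.foldl pvGroupPizza PySem.Dict.empty).items
      from rfl,
      main_comm pizza_list PySem.Dict.empty (PySem.Dict.ofList D)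
        (PySem.Dict.nodup_keys_ofList D) (by simp [PySem.Dict.empty, PySem.Dict.keys])
        (by intro p hp; simp [PySem.Dict.empty] at hp)]
  rfl
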